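-- pv_equiv track=rewrite | github.com/sunilsoni/interview-notes-python | com/interview/2024/march/test1/get_request_status1.py | getRequestStatus1
-- ===== SOURCE A (Python) =====
-- from collections import defaultdict
--
-- def getRequestStatus1(requests):
--     # Dictionary to store the timestamps of last requests from each domain
--     last_request_time = defaultdict(list)
--
--     # List to store the status of each request
--     result = []
--
--     # Function to check if a request can be processed based on the rate limiting rules
--     def can_process_request(domain, current_time):
--         # Number of requests allowed within 5 seconds and 30 seconds
--         requests_within_5s = 2
--         requests_within_30s = 5
--
--         # Check if there are more than 2 requests within 5 seconds
--         if len(last_request_time[domain]) >= requests_within_5s: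
--             if current_time - last_request_time[domain][-requests_within_5s] < 5:
--                 return False
--
--         # Check if there are more than 5 requests within 30 seconds
--         if len(last_request_time[domain]) >= requests_within_30s:
--             if current_time - last_request_time[domain][-requests_within_30s] < 30:
--                 return False
--
--         return True
--
--     # Process each request
--     for request in requests:
--         current_time = len(result)  # Time starts from 0
--
--         # Extract domain from the request
--         domain = request.strip()
--
--         # Check if the request can be processed
--         if can_process_request(domain, current_time):
--             result.append("{status: 200, message: OK}")
--             last_request_time[domain].append(current_time)
--         else:
--             result.append("{status: 429, message: Too many requests}")
--
--     return result
-- ===== SOURCE B (Python) =====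
-- def getRequestStatus1(requests):
--     # Flat log of recently accepted (domain, time) pairs; each tick, entries
--     # older than the 30s window are pruned (they can never matter again), then
--     # the decision is made by counting matching log entries inside the 5s and
--     # 30s windows -- no per-domain dict, no 2nd/5th-last indexing.
--     log = []
--     out = []
--     for i, request in enumerate(requests):
--         log = [(dom, t) for (dom, t) in log if i - t < 30]
--         d = request.strip()
--         n5 = sum(1 for dom, t in log if dom == d and i - t < 5)
--         n30 = sum(1 for dom, t in log if dom == d and i - t < 30)
--         if n5 >= 2 or n30 >= 5:
--             out.append("{status: 429, message: Too many requests}")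
--         else:
--             out.append("{status: 200, message: OK}")
--             log.append((d, i))
--     return out
-- ===== Notes on version B (the rewrite author's own statement) =====
-- stated objective: alternative
-- what changed: Replaces A's per-domain defaultdict whose 2nd-last/5th-last stored timestamp is indexed by a single flat log of accepted (domain, time) pairs, pruned each tick to the 30s window (older entries can never matter) and scanned to count same-domain entries inside the 5s and 30s windows (>=2 resp. >=5 rejects).
import Mathlib
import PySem

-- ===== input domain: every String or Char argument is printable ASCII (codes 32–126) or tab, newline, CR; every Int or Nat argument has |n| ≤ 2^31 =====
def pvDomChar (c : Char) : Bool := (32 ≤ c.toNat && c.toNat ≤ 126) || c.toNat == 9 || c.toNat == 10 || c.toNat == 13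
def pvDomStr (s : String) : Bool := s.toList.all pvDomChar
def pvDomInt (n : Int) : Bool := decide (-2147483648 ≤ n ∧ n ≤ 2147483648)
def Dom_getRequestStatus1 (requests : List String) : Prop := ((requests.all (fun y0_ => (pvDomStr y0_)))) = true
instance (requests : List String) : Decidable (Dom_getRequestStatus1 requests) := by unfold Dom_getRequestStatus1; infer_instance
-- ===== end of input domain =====

-- B replaces A's per-domain dict, indexed at the 2nd-last/5th-last stored timestamp,
-- by one flat log of recently accepted (domain, time) pairs, pruned to the 30s window
-- each tick and counted inside the 5s/30s windows (alternative decomposition).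

-- ===== PORT A =====
-- can_process_request: reads the domain's stored timestamps and indexes the 2nd-last / 5th-last
def pvCanProcessRequest (lastRequestTime : PySem.Dict String (List Int)) (domain : String) (currentTime : Int) : Bool :=
  let ts := lastRequestTime.getD domain []
  if 2 ≤ ts.length ∧ currentTime - ((PySem.List.pyGet? ts (-2)).getD 0) < 5 then false
  else if 5 ≤ ts.length ∧ currentTime - ((PySem.List.pyGet? ts (-5)).getD 0) < 30 then false
  else true

def getRequestStatus1 (requests : List String) : List String :=
  (requests.foldl
    (fun (st : PySem.Dict String (List Int) × List String) request =>
      let lastRequestTime := st.1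
      let result := st.2
      let currentTime : Int := (result.length : Int)
      let domain := PySem.Str.strip request
      if pvCanProcessRequest lastRequestTime domain currentTime then
        (lastRequestTime.insert domain (lastRequestTime.getD domain [] ++ [currentTime]),
         result ++ ["{status: 200, message: OK}"])
      else
        (lastRequestTime, result ++ ["{status: 429, message: Too many requests}"]))
    (PySem.Dict.empty, [])).2

-- ===== PORT B =====
-- the loop of Source B as structural recursion: log holds accepted (domain, time) pairs
-- from the last 30 ticks; it is pruned, then scanned, each iteration
def pvAltGo (log : List (String × Int)) (i : Int) : List String → List String
  | [] => []
  | request :: rest =>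
    let log' := log.filter (fun p => decide (i - p.2 < 30))
    let d := PySem.Str.strip request
    let n5 := log'.countP (fun p => p.1 == d && decide (i - p.2 < 5))
    let n30 := log'.countP (fun p => p.1 == d && decide (i - p.2 < 30))
    if 2 ≤ n5 ∨ 5 ≤ n30 then
      "{status: 429, message: Too many requests}" :: pvAltGo log' (i + 1) rest
    else
      "{status: 200, message: OK}" :: pvAltGo (log' ++ [(d, i)]) (i + 1) rest

def getRequestStatus1_alt (requests : List String) : List String := pvAltGo [] 0 requests

-- ===== PRECONDITION & SPEC =====
def Spec_getRequestStatus1 (requests : List String) (out : List String) : Prop := out = getRequestStatus1_alt requests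
instance (requests : List String) (out : List String) : Decidable (Spec_getRequestStatus1 requests out) := by unfold Spec_getRequestStatus1; infer_instance

-- ===== CLAIM (what is proved, stated in full; the proofs are below) =====
def Claim_equal_getRequestStatus1 : Prop := ∀ (requests : List String), Dom_getRequestStatus1 requests → Spec_getRequestStatus1 requests (getRequestStatus1 requests)

-- ===== LEMMAS AND PROOFS =====

-- the timestamp list A stores for domain d, recovered from B's flat success log
def pvSts (succ : List (String × Int)) (d : String) : List Int :=
  (succ.filter (fun p => p.1 == d)).map Prod.snd

-- B's count over the flat log equals a count over the domain's timestamp list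
lemma pvCountP_window (succ : List (String × Int)) (d : String) (i k : Int) :
    succ.countP (fun p => p.1 == d && decide (i - p.2 < k)) =
      (pvSts succ d).countP (fun t => decide (i - t < k)) := by
  induction succ with
  | nil => simp [pvSts]
  | cons a t ih =>
    by_cases h : a.1 == d <;>
      simp [pvSts, List.countP_cons, h] at ih ⊢ <;> omega

lemma pvSts_append (succ : List (String × Int)) (d d' : String) (i : Int) :
    pvSts (succ ++ [(d, i)]) d' = pvSts succ d' ++ (if d == d' then [i] else []) := by
  by_cases h : d == d' <;> simp [pvSts, List.filter_append, h]

-- on a nondecreasing list, an upward-closed predicate holds on ≥ m elements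
-- iff it holds on the m-th-from-last element
lemma pvCountP_ge_iff (p : Int → Bool) (hmono : ∀ a b : Int, a ≤ b → p a = true → p b = true)
    (m : Nat) (hm : 1 ≤ m) :
    ∀ ts : List Int, ts.Pairwise (· ≤ ·) →
      (m ≤ ts.countP p ↔ m ≤ ts.length ∧ p (ts.getD (ts.length - m) 0) = true) := by
  intro ts
  induction ts with
  | nil => intro _; simp; omega
  | cons t rest ih =>
    intro hp
    rw [List.pairwise_cons] at hp
    obtain ⟨h1, h2⟩ := hp
    by_cases hpt : p t = true
    · have hall : ∀ x ∈ t :: rest, p x = true := by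
        intro x hx
        rcases List.mem_cons.mp hx with rfl | hx
        · exact hpt
        · exact hmono t x (h1 x hx) hpt
      rw [List.countP_eq_length.mpr hall]
      constructor
      · intro hlen
        refine ⟨hlen, ?_⟩
        have hidx : (t :: rest).length - m < (t :: rest).length := by
          simp; omega
        rw [List.getD_eq_getElem?_getD, List.getElem?_eq_getElem hidx]
        exact hall _ (List.getElem_mem hidx)
      · intro h; exact h.1
    · rw [List.countP_cons_of_neg (by simpa using hpt)]
      rcases Nat.lt_or_ge rest.length m with hlt | hge
      · constructor
        · intro hc
          have := List.countP_le_length (l := rest) (p := p)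
          omega
        · intro ⟨hlen, hval⟩
          simp only [List.length_cons] at hlen
          have hm1 : m = rest.length + 1 := by omega
          rw [hm1] at hval
          simp at hval
          exact absurd hval hpt
      · have heq : (t :: rest).length - m = (rest.length - m) + 1 := by
          simp; omega
        rw [heq, List.getD_cons_succ, ih h2]
        simp; omega

-- "≥ m timestamps inside the window" is A's test on the m-th-from-last timestamp
lemma pvWindow_iff (ts : List Int) (i : Int) (hpw : ts.Pairwise (· ≤ ·))
    (m : Nat) (hm : 1 ≤ m) (k : Int) :
    (m ≤ ts.countP (fun t => decide (i - t < k))) ↔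
      (m ≤ ts.length ∧ i - ((PySem.List.pyGet? ts (-(m : Int))).getD 0) < k) := by
  rw [pvCountP_ge_iff (fun t => decide (i - t < k))
    (fun a b hab h => by simp at h ⊢; omega) m hm ts hpw]
  constructor
  · rintro ⟨hlen, hval⟩
    refine ⟨hlen, ?_⟩
    rw [PySem.List.pyGet?_neg_natCast ts m (by omega) (by omega), ← List.getD_eq_getElem?_getD]
    simpa using hval
  · rintro ⟨hlen, hval⟩
    refine ⟨hlen, ?_⟩
    rw [PySem.List.pyGet?_neg_natCast ts m (by omega) (by omega),
      ← List.getD_eq_getElem?_getD] at hval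
    simpa using hval

-- pvSts commutes with pruning the log to a 30s window
lemma pvSts_filter (succ : List (String × Int)) (d : String) (j : Int) :
    pvSts (succ.filter (fun p => decide (j - p.2 < 30))) d =
      (pvSts succ d).filter (fun t => decide (j - t < 30)) := by
  induction succ with
  | nil => simp [pvSts]
  | cons a t ih =>
    by_cases h : a.1 == d <;> by_cases hq : j - a.2 < 30 <;>
      simp [pvSts, h, hq] at ih ⊢ <;> simpa [pvSts, h, hq] using ih

-- shrinking the 30s window twice keeps only the later filter
lemma pvFilter_shrink (ts : List Int) (i j : Int) (h : i ≤ j) :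
    (ts.filter (fun t => decide (i - t < 30))).filter (fun t => decide (j - t < 30)) =
      ts.filter (fun t => decide (j - t < 30)) := by
  rw [List.filter_filter]
  apply List.filter_congr
  intro t _
  by_cases h1 : j - t < 30
  · simp [h1]; omega
  · simp [h1]

-- A's guard equals B's window counts over the pruned log
lemma pvDecision (log' : List (String × Int)) (d : String) (i : Int)
    (last : PySem.Dict String (List Int))
    (hinv : pvSts log' d = (last.getD d []).filter (fun t => decide (i - t < 30)))
    (hpw : (last.getD d []).Pairwise (· ≤ ·)) :
    (pvCanProcessRequest last d i = true) ↔
      ¬ (2 ≤ log'.countP (fun p => p.1 == d && decide (i - p.2 < 5)) ∨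
         5 ≤ log'.countP (fun p => p.1 == d && decide (i - p.2 < 30))) := by
  rw [pvCountP_window log' d i 5, pvCountP_window log' d i 30, hinv]
  have hn5 : ((last.getD d []).filter (fun t => decide (i - t < 30))).countP
      (fun t => decide (i - t < 5)) = (last.getD d []).countP (fun t => decide (i - t < 5)) := by
    rw [List.countP_filter]
    apply List.countP_congr
    intro t _
    by_cases h1 : i - t < 5
    · simp [h1]; omega
    · simp [h1]
  have hn30 : ((last.getD d []).filter (fun t => decide (i - t < 30))).countP
      (fun t => decide (i - t < 30)) = (last.getD d []).countP (fun t => decide (i - t < 30)) := by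
    rw [List.countP_filter]
    apply List.countP_congr
    intro t _
    by_cases h1 : i - t < 30 <;> simp [h1]
  rw [hn5, hn30]
  have h5 := pvWindow_iff (last.getD d []) i hpw 2 (by omega) 5
  have h30 := pvWindow_iff (last.getD d []) i hpw 5 (by omega) 30
  norm_num at h5 h30
  unfold pvCanProcessRequest
  rw [h5, h30]
  dsimp only
  split_ifs with hc1 hc2
  · exact iff_of_false (by simp) (not_not_intro (Or.inl hc1))
  · exact iff_of_false (by simp) (not_not_intro (Or.inr hc2))
  · exact iff_of_true rfl (not_or.mpr ⟨hc1, hc2⟩)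

def pvStepA (st : PySem.Dict String (List Int) × List String) (request : String) :
    PySem.Dict String (List Int) × List String :=
  let lastRequestTime := st.1
  let result := st.2
  let currentTime : Int := (result.length : Int)
  let domain := PySem.Str.strip request
  if pvCanProcessRequest lastRequestTime domain currentTime then
    (lastRequestTime.insert domain (lastRequestTime.getD domain [] ++ [currentTime]),
     result ++ ["{status: 200, message: OK}"])
  else
    (lastRequestTime, result ++ ["{status: 429, message: Too many requests}"])

lemma pvLoop_eq (reqs : List String) :
    ∀ (last : PySem.Dict String (List Int)) (log : List (String × Int)) (result : List String),
      (∀ d, pvSts (log.filter (fun p => decide ((result.length : Int) - p.2 < 30))) d =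
        (last.getD d []).filter (fun t => decide ((result.length : Int) - t < 30))) →
      (∀ d, ∀ t ∈ last.getD d [], t < (result.length : Int)) →
      (∀ d, (last.getD d []).Pairwise (· ≤ ·)) →
      (reqs.foldl pvStepA (last, result)).2 = result ++ pvAltGo log (result.length : Int) reqs := by
  induction reqs with
  | nil => intro last log result _ _ _; simp [pvAltGo]
  | cons r rest ih =>
    intro last log result h1 h2 h3
    rw [List.foldl_cons, pvAltGo]
    set i : Int := (result.length : Int) with hi
    set d := PySem.Str.strip r with hdd
    set log' := log.filter (fun p => decide (i - p.2 < 30)) with hlog'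
    have hdec := pvDecision log' d i last (h1 d) (h3 d)
    -- re-pruning at clock i+1: the invariant for the next iteration's base log
    have hbase : ∀ d', pvSts (log'.filter (fun p => decide ((i + 1) - p.2 < 30))) d' =
        (last.getD d' []).filter (fun t => decide ((i + 1) - t < 30)) := by
      intro d'
      rw [hlog', List.filter_filter]
      have hq : (log.filter (fun p => decide ((i+1) - p.2 < 30) && decide (i - p.2 < 30))) =
          log.filter (fun p => decide ((i+1) - p.2 < 30)) := by
        apply List.filter_congr
        intro p _
        by_cases h' : (i+1) - p.2 < 30
        · simp [h']; omega
        · simp [h']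
      rw [hq, pvSts_filter]
      have h1' := h1 d'
      rw [pvSts_filter] at h1'
      calc (pvSts log d').filter (fun t => decide ((i+1) - t < 30))
          = ((pvSts log d').filter (fun t => decide (i - t < 30))).filter
              (fun t => decide ((i+1) - t < 30)) := (pvFilter_shrink _ i (i+1) (by omega)).symm
        _ = ((last.getD d' []).filter (fun t => decide (i - t < 30))).filter
              (fun t => decide ((i+1) - t < 30)) := by rw [h1']
        _ = (last.getD d' []).filter (fun t => decide ((i+1) - t < 30)) :=
              pvFilter_shrink _ i (i+1) (by omega)
    by_cases hc : 2 ≤ log'.countP (fun p => p.1 == d && decide (i - p.2 < 5)) ∨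
        5 ≤ log'.countP (fun p => p.1 == d && decide (i - p.2 < 30))
    · -- rejected: dict unchanged, pruned log carried on
      have hstep : pvStepA (last, result) r =
          (last, result ++ ["{status: 429, message: Too many requests}"]) := by
        unfold pvStepA
        exact if_neg (fun h => (hdec.mp h) hc)
      rw [hstep,
        ih last log' (result ++ ["{status: 429, message: Too many requests}"])
          (by intro d'
              simp only [List.length_append, List.length_cons, List.length_nil]
              have := hbase d'
              push_cast
              convert this using 3)
          (by intro d' t ht
              have := h2 d' t ht
              simp only [List.length_append, List.length_cons, List.length_nil]
              push_cast; omega) h3]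
      simp only [List.length_append, List.length_cons, List.length_nil]
      rw [if_pos hc]
      push_cast
      simp
      rfl
    · -- accepted: A appends i to the domain's list, B appends (d, i) to the pruned log
      have hstep : pvStepA (last, result) r =
          (last.insert d (last.getD d [] ++ [i]), result ++ ["{status: 200, message: OK}"]) := by
        unfold pvStepA
        exact if_pos (hdec.mpr hc)
      have hnew1 : ∀ d', pvSts ((log' ++ [(d, i)]).filter
            (fun p => decide ((i + 1) - p.2 < 30))) d' =
          (((last.insert d (last.getD d [] ++ [i])).getD d' []).filter
            (fun t => decide ((i + 1) - t < 30))) := by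
        intro d'
        rw [List.filter_append]
        have hkeep : ([(d, i)].filter (fun p => decide ((i + 1) - p.2 < 30))) = [(d, i)] := by
          simp
        rw [hkeep, pvSts_append, hbase d', PySem.Dict.getD_insert]
        by_cases hdd' : d' = d
        · rw [hdd', if_pos rfl, List.filter_append]
          simp
        · have hb : (d == d') = false := by
            simpa using fun h => hdd' h.symm
          rw [if_neg hdd', hb]
          simp
      have hnew2 : ∀ d', ∀ t ∈ (last.insert d (last.getD d [] ++ [i])).getD d' [], t < i + 1 := by
        intro d' t ht
        rw [PySem.Dict.getD_insert] at ht
        by_cases hdd' : d' = d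
        · rw [if_pos hdd'] at ht
          rcases List.mem_append.mp ht with ht | ht
          · have := h2 d t ht; omega
          · simp at ht; omega
        · rw [if_neg hdd'] at ht
          have := h2 d' t ht; omega
      have hnew3 : ∀ d', ((last.insert d (last.getD d [] ++ [i])).getD d' []).Pairwise (· ≤ ·) := by
        intro d'
        rw [PySem.Dict.getD_insert]
        by_cases hdd' : d' = d
        · rw [if_pos hdd']
          rw [List.pairwise_append]
          refine ⟨h3 d, by simp, ?_⟩
          intro a ha b hb
          simp at hb
          rw [hb]
          exact le_of_lt (h2 d a ha)
        · rw [if_neg hdd']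
          exact h3 d'
      rw [hstep,
        ih (last.insert d (last.getD d [] ++ [i])) (log' ++ [(d, i)])
          (result ++ ["{status: 200, message: OK}"])
          (by intro d'
              simp only [List.length_append, List.length_cons, List.length_nil]
              have := hnew1 d'
              push_cast
              convert this using 3)
          (by intro d' t ht
              simp only [List.length_append, List.length_cons, List.length_nil]
              push_cast
              exact hnew2 d' t ht) hnew3]
      simp only [List.length_append, List.length_cons, List.length_nil]
      rw [if_neg hc]
      push_cast
      simp
      rfl

-- ===== VERDICT (by name: the statement is the Claim_ definition above) =====
theorem getRequestStatus1_spec : Claim_equal_getRequestStatus1 := by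
  intro requests _
  unfold Spec_getRequestStatus1 getRequestStatus1 getRequestStatus1_alt
  simpa using pvLoop_eq requests PySem.Dict.empty [] []
    (by intro d; simp [pvSts, PySem.Dict.getD_empty]) (by simp) (by simp)
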